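-- pv_equiv track=rewrite | github.com/Wildanae123/Network-Management-Platform | backend/app/services/api_service.py | _get_command_groups
-- ===== SOURCE A (Python) =====
-- from typing import Dict, List, Any, Optional, Union
--
-- def _get_command_groups(device_type: str, selected_commands: List[str] = None) -> Dict[str, Dict[str, str]]:
--     """Get command groups based on device type and selected commands."""
--
--     # Define command mappings for Arista EOS
--     arista_commands = {
--         "interfaces": {
--             "show interfaces status": "show interfaces status",
--             "show interfaces description": "show interfaces description"
--         },
--         "mlag": {
--             "show mlag config-sanity": "show mlag config-sanity",
--             "show mlag interfaces detail": "show mlag interfaces detail"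
--         },
--         "protocols": {
--             "show lldp neighbors": "show lldp neighbors",
--             "show ip arp": "show ip arp"
--         },
--         "routing": {
--             "show ip route summary": "show ip route summary"
--         },
--         "switching": {
--             "show mac address-table": "show mac address-table",
--             "show vlan brief": "show vlan brief",
--             "show port-channel detailed": "show port-channel detailed"
--         },
--         "system_info": {
--             "show version": "show version",
--             "show hostname": "show hostname"
--         }
--     }
--
--     # Define command mappings for other device types (can be extended)
--     cisco_commands = {
--         "interfaces": {
--             "show interface status": "show interface status",
--             "show interface description": "show interface description"
--         },
--         "system_info": {
--             "show version": "show version",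
--             "show running-config | include hostname": "show running-config | include hostname"
--         }
--     }
--
--     # Select appropriate command set based on device type
--     if device_type == "arista_eos":
--         all_commands = arista_commands
--     elif device_type in ["cisco_ios", "cisco_nexus", "cisco_iosxr"]:
--         all_commands = cisco_commands
--     else:
--         all_commands = arista_commands  # Default to Arista
--
--     # Filter commands based on selected_commands if provided
--     if selected_commands:
--         filtered_commands = {}
--         for cmd in selected_commands:
--             # Map selected command names to groups
--             if cmd == "arista_eos_interfaces" and "interfaces" in all_commands:
--                 filtered_commands["interfaces"] = all_commands["interfaces"]
--             elif cmd == "arista_eos_mlag" and "mlag" in all_commands: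
--                 filtered_commands["mlag"] = all_commands["mlag"]
--             elif cmd == "arista_eos_protocols" and "protocols" in all_commands:
--                 filtered_commands["protocols"] = all_commands["protocols"]
--             elif cmd == "arista_eos_routing" and "routing" in all_commands:
--                 filtered_commands["routing"] = all_commands["routing"]
--             elif cmd == "arista_eos_switching" and "switching" in all_commands:
--                 filtered_commands["switching"] = all_commands["switching"]
--             elif cmd == "arista_eos_system_info" and "system_info" in all_commands:
--                 filtered_commands["system_info"] = all_commands["system_info"]
--
--         return filtered_commands if filtered_commands else all_commands
--
--     return all_commands
-- ===== SOURCE B (Python) =====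
-- def _get_command_groups(device_type: str, selected_commands=None):
--     """Get command groups based on device type and selected commands."""
--
--     arista_commands = {
--         "interfaces": {
--             "show interfaces status": "show interfaces status",
--             "show interfaces description": "show interfaces description"
--         },
--         "mlag": {
--             "show mlag config-sanity": "show mlag config-sanity",
--             "show mlag interfaces detail": "show mlag interfaces detail"
--         },
--         "protocols": {
--             "show lldp neighbors": "show lldp neighbors",
--             "show ip arp": "show ip arp"
--         },
--         "routing": {
--             "show ip route summary": "show ip route summary"
--         },
--         "switching": {
--             "show mac address-table": "show mac address-table",
--             "show vlan brief": "show vlan brief",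
--             "show port-channel detailed": "show port-channel detailed"
--         },
--         "system_info": {
--             "show version": "show version",
--             "show hostname": "show hostname"
--         }
--     }
--
--     cisco_commands = {
--         "interfaces": {
--             "show interface status": "show interface status",
--             "show interface description": "show interface description"
--         },
--         "system_info": {
--             "show version": "show version",
--             "show running-config | include hostname": "show running-config | include hostname"
--         }
--     }
--
--     # cisco variants get the cisco set; everything else (incl. the default) gets Arista
--     if device_type in ("cisco_ios", "cisco_nexus", "cisco_iosxr"):
--         all_commands = cisco_commands
--     else:
--         all_commands = arista_commands
--
--     if selected_commands:
--         prefix = "arista_eos_"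
--         filtered_commands = {}
--         for cmd in selected_commands:
--             if cmd.startswith(prefix):
--                 group = cmd[len(prefix):]
--                 if group in all_commands:
--                     filtered_commands[group] = all_commands[group]
--         return filtered_commands or all_commands
--
--     return all_commands
-- ===== Notes on version B (the rewrite author's own statement) =====
-- stated objective: idiomatic
-- what changed: The six-way if/elif chain of literal command-name comparisons is replaced by stripping the common command-name prefix and a single dict-membership test on the stripped group name, and the three-way device_type branch collapses to one cisco-membership test with Arista as the default.
import Mathlib
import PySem

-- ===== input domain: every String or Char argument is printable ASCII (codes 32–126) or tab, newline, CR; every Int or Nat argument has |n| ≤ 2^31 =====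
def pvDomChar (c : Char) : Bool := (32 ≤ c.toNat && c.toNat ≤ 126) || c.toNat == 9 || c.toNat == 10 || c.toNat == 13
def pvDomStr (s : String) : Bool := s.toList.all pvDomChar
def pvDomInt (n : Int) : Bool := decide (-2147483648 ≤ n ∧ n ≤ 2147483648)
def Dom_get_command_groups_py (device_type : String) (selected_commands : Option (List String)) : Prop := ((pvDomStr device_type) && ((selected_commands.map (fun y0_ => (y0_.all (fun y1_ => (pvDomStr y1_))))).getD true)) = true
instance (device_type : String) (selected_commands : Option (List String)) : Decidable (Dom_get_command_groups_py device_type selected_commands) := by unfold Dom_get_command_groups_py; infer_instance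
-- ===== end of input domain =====

-- B replaces A's six-way if/elif chain of literal equality tests by a prefix-strip plus one
-- dict-membership test, and collapses the device_type selection to a single cisco test (idiomatic).

-- ===== PORT A =====

-- the arista_commands dict literal (inner dicts are their item lists; no operations touch them)
def pvArista : PySem.Dict String (List (String × String)) := PySem.Dict.mk
  [ ("interfaces",
      [("show interfaces status", "show interfaces status"),
       ("show interfaces description", "show interfaces description")]),
    ("mlag",
      [("show mlag config-sanity", "show mlag config-sanity"),
       ("show mlag interfaces detail", "show mlag interfaces detail")]),
    ("protocols",
      [("show lldp neighbors", "show lldp neighbors"),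
       ("show ip arp", "show ip arp")]),
    ("routing",
      [("show ip route summary", "show ip route summary")]),
    ("switching",
      [("show mac address-table", "show mac address-table"),
       ("show vlan brief", "show vlan brief"),
       ("show port-channel detailed", "show port-channel detailed")]),
    ("system_info",
      [("show version", "show version"),
       ("show hostname", "show hostname")]) ]

-- the cisco_commands dict literal
def pvCisco : PySem.Dict String (List (String × String)) := PySem.Dict.mk
  [ ("interfaces",
      [("show interface status", "show interface status"),
       ("show interface description", "show interface description")]),
    ("system_info",
      [("show version", "show version"),
       ("show running-config | include hostname", "show running-config | include hostname")]) ]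

-- the body of A's for-loop: the six-way cmd == … if/elif chain
def pvStepA (all : PySem.Dict String (List (String × String)))
    (d : PySem.Dict String (List (String × String))) (cmd : String) :
    PySem.Dict String (List (String × String)) :=
  if cmd == "arista_eos_interfaces" && all.contains "interfaces" then
    d.insert "interfaces" ((all.get? "interfaces").getD [])
  else if cmd == "arista_eos_mlag" && all.contains "mlag" then
    d.insert "mlag" ((all.get? "mlag").getD [])
  else if cmd == "arista_eos_protocols" && all.contains "protocols" then
    d.insert "protocols" ((all.get? "protocols").getD [])
  else if cmd == "arista_eos_routing" && all.contains "routing" then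
    d.insert "routing" ((all.get? "routing").getD [])
  else if cmd == "arista_eos_switching" && all.contains "switching" then
    d.insert "switching" ((all.get? "switching").getD [])
  else if cmd == "arista_eos_system_info" && all.contains "system_info" then
    d.insert "system_info" ((all.get? "system_info").getD [])
  else d

def get_command_groups_py (device_type : String) (selected_commands : Option (List String)) :
    List (String × List (String × String)) :=
  let all_commands :=
    if device_type == "arista_eos" then pvArista
    else if device_type == "cisco_ios" || device_type == "cisco_nexus" || device_type == "cisco_iosxr" then pvCisco
    else pvArista
  match selected_commands with
  | none => all_commands.items
  | some cmds =>
    if cmds.isEmpty then all_commands.items   -- `if selected_commands:` is false for []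
    else
      let filtered := cmds.foldl (pvStepA all_commands) PySem.Dict.empty
      if filtered.items.isEmpty then all_commands.items else filtered.items

-- ===== PORT B =====

-- the body of B's for-loop: strip the 'arista_eos_' prefix, one membership test
def pvStepB (all : PySem.Dict String (List (String × String)))
    (d : PySem.Dict String (List (String × String))) (cmd : String) :
    PySem.Dict String (List (String × String)) :=
  if PySem.Str.startswith cmd "arista_eos_" then
    let group := PySem.Str.slice cmd (some 11) none   -- cmd[len("arista_eos_"):]
    if all.contains group then d.insert group ((all.get? group).getD []) else d
  else d

def get_command_groups_py_alt (device_type : String) (selected_commands : Option (List String)) :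
    List (String × List (String × String)) :=
  let all_commands :=
    if device_type == "cisco_ios" || device_type == "cisco_nexus" || device_type == "cisco_iosxr"
    then pvCisco else pvArista
  match selected_commands with
  | none => all_commands.items
  | some cmds =>
    if cmds.isEmpty then all_commands.items
    else
      let filtered := cmds.foldl (pvStepB all_commands) PySem.Dict.empty
      if filtered.items.isEmpty then all_commands.items else filtered.items

-- ===== PRECONDITION & SPEC =====
def Spec_get_command_groups_py (device_type : String) (selected_commands : Option (List String)) (out : List (String × List (String × String))) : Prop := out = get_command_groups_py_alt device_type selected_commands
instance (device_type : String) (selected_commands : Option (List String)) (out : List (String × List (String × String))) : Decidable (Spec_get_command_groups_py device_type selected_commands out) := by unfold Spec_get_command_groups_py; infer_instance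

-- ===== CLAIM (what is proved, stated in full; the proofs are below) =====
def Claim_equal_get_command_groups_py : Prop := ∀ (device_type : String) (selected_commands : Option (List String)), Dom_get_command_groups_py device_type selected_commands → Spec_get_command_groups_py device_type selected_commands (get_command_groups_py device_type selected_commands)

-- ===== LEMMAS AND PROOFS =====

-- a string starting with "arista_eos_" is that prefix followed by its own 11-drop
lemma pv_recover (cmd : String) (hs : PySem.Str.startswith cmd "arista_eos_" = true) :
    cmd.toList = "arista_eos_".toList ++ (PySem.Str.slice cmd (some 11) none).toList := by
  have hpre : "arista_eos_".toList <+: cmd.toList :=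
    (PySem.Chars.startswith_iff _ _).mp (by simpa using hs)
  obtain ⟨t, ht⟩ := hpre
  have hsl : (PySem.Str.slice cmd (some 11) none).toList = t := by
    rw [PySem.Str.toList_slice, PySem.Chars.slice_eq_listSlice,
      PySem.List.slice_from _ (by norm_num : (0:Int) ≤ 11), ← ht,
      (by decide : ((11:Int)).toNat = ("arista_eos_".toList).length), List.drop_left]
  rw [hsl, ht]

-- cmd starts with "arista_eos_" and cmd[11:] = g  ⇒  cmd is "arista_eos_" ++ g, as char lists
lemma pv_cmd_eq (cmd g : String) (hs : PySem.Str.startswith cmd "arista_eos_" = true)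
    (hg : PySem.Str.slice cmd (some 11) none = g) :
    cmd.toList = "arista_eos_".toList ++ g.toList := by
  simpa [hg] using pv_recover cmd hs

-- the two loop bodies agree on the arista command set
lemma pv_step_arista (d : PySem.Dict String (List (String × String))) (cmd : String) :
    pvStepA pvArista d cmd = pvStepB pvArista d cmd := by
  by_cases h1 : cmd = "arista_eos_interfaces"
  · subst h1
    have e1 : pvStepA pvArista d "arista_eos_interfaces" = d.insert "interfaces" ((pvArista.get? "interfaces").getD []) := by
      unfold pvStepA
      rw [if_pos (by decide : (("arista_eos_interfaces" == "arista_eos_interfaces") && pvArista.contains "interfaces") = true)]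
    have e2 : pvStepB pvArista d "arista_eos_interfaces" = d.insert "interfaces" ((pvArista.get? "interfaces").getD []) := by
      simp only [pvStepB, (by decide : PySem.Str.slice "arista_eos_interfaces" (some 11) none = "interfaces")]
      rw [if_pos (by decide : (PySem.Str.startswith "arista_eos_interfaces" "arista_eos_") = true),
        if_pos (by decide : (pvArista.contains "interfaces") = true)]
    rw [e1, e2]
  by_cases h2 : cmd = "arista_eos_mlag"
  · subst h2
    have e1 : pvStepA pvArista d "arista_eos_mlag" = d.insert "mlag" ((pvArista.get? "mlag").getD []) := by
      unfold pvStepA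
      rw [if_neg (by decide : ¬ ((("arista_eos_mlag" == "arista_eos_interfaces") && pvArista.contains "interfaces") = true))]
      rw [if_pos (by decide : (("arista_eos_mlag" == "arista_eos_mlag") && pvArista.contains "mlag") = true)]
    have e2 : pvStepB pvArista d "arista_eos_mlag" = d.insert "mlag" ((pvArista.get? "mlag").getD []) := by
      simp only [pvStepB, (by decide : PySem.Str.slice "arista_eos_mlag" (some 11) none = "mlag")]
      rw [if_pos (by decide : (PySem.Str.startswith "arista_eos_mlag" "arista_eos_") = true),
        if_pos (by decide : (pvArista.contains "mlag") = true)]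
    rw [e1, e2]
  by_cases h3 : cmd = "arista_eos_protocols"
  · subst h3
    have e1 : pvStepA pvArista d "arista_eos_protocols" = d.insert "protocols" ((pvArista.get? "protocols").getD []) := by
      unfold pvStepA
      rw [if_neg (by decide : ¬ ((("arista_eos_protocols" == "arista_eos_interfaces") && pvArista.contains "interfaces") = true))]
      rw [if_neg (by decide : ¬ ((("arista_eos_protocols" == "arista_eos_mlag") && pvArista.contains "mlag") = true))]
      rw [if_pos (by decide : (("arista_eos_protocols" == "arista_eos_protocols") && pvArista.contains "protocols") = true)]
    have e2 : pvStepB pvArista d "arista_eos_protocols" = d.insert "protocols" ((pvArista.get? "protocols").getD []) := by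
      simp only [pvStepB, (by decide : PySem.Str.slice "arista_eos_protocols" (some 11) none = "protocols")]
      rw [if_pos (by decide : (PySem.Str.startswith "arista_eos_protocols" "arista_eos_") = true),
        if_pos (by decide : (pvArista.contains "protocols") = true)]
    rw [e1, e2]
  by_cases h4 : cmd = "arista_eos_routing"
  · subst h4
    have e1 : pvStepA pvArista d "arista_eos_routing" = d.insert "routing" ((pvArista.get? "routing").getD []) := by
      unfold pvStepA
      rw [if_neg (by decide : ¬ ((("arista_eos_routing" == "arista_eos_interfaces") && pvArista.contains "interfaces") = true))]
      rw [if_neg (by decide : ¬ ((("arista_eos_routing" == "arista_eos_mlag") && pvArista.contains "mlag") = true))]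
      rw [if_neg (by decide : ¬ ((("arista_eos_routing" == "arista_eos_protocols") && pvArista.contains "protocols") = true))]
      rw [if_pos (by decide : (("arista_eos_routing" == "arista_eos_routing") && pvArista.contains "routing") = true)]
    have e2 : pvStepB pvArista d "arista_eos_routing" = d.insert "routing" ((pvArista.get? "routing").getD []) := by
      simp only [pvStepB, (by decide : PySem.Str.slice "arista_eos_routing" (some 11) none = "routing")]
      rw [if_pos (by decide : (PySem.Str.startswith "arista_eos_routing" "arista_eos_") = true),
        if_pos (by decide : (pvArista.contains "routing") = true)]
    rw [e1, e2]
  by_cases h5 : cmd = "arista_eos_switching"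
  · subst h5
    have e1 : pvStepA pvArista d "arista_eos_switching" = d.insert "switching" ((pvArista.get? "switching").getD []) := by
      unfold pvStepA
      rw [if_neg (by decide : ¬ ((("arista_eos_switching" == "arista_eos_interfaces") && pvArista.contains "interfaces") = true))]
      rw [if_neg (by decide : ¬ ((("arista_eos_switching" == "arista_eos_mlag") && pvArista.contains "mlag") = true))]
      rw [if_neg (by decide : ¬ ((("arista_eos_switching" == "arista_eos_protocols") && pvArista.contains "protocols") = true))]
      rw [if_neg (by decide : ¬ ((("arista_eos_switching" == "arista_eos_routing") && pvArista.contains "routing") = true))]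
      rw [if_pos (by decide : (("arista_eos_switching" == "arista_eos_switching") && pvArista.contains "switching") = true)]
    have e2 : pvStepB pvArista d "arista_eos_switching" = d.insert "switching" ((pvArista.get? "switching").getD []) := by
      simp only [pvStepB, (by decide : PySem.Str.slice "arista_eos_switching" (some 11) none = "switching")]
      rw [if_pos (by decide : (PySem.Str.startswith "arista_eos_switching" "arista_eos_") = true),
        if_pos (by decide : (pvArista.contains "switching") = true)]
    rw [e1, e2]
  by_cases h6 : cmd = "arista_eos_system_info"
  · subst h6
    have e1 : pvStepA pvArista d "arista_eos_system_info" = d.insert "system_info" ((pvArista.get? "system_info").getD []) := by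
      unfold pvStepA
      rw [if_neg (by decide : ¬ ((("arista_eos_system_info" == "arista_eos_interfaces") && pvArista.contains "interfaces") = true))]
      rw [if_neg (by decide : ¬ ((("arista_eos_system_info" == "arista_eos_mlag") && pvArista.contains "mlag") = true))]
      rw [if_neg (by decide : ¬ ((("arista_eos_system_info" == "arista_eos_protocols") && pvArista.contains "protocols") = true))]
      rw [if_neg (by decide : ¬ ((("arista_eos_system_info" == "arista_eos_routing") && pvArista.contains "routing") = true))]
      rw [if_neg (by decide : ¬ ((("arista_eos_system_info" == "arista_eos_switching") && pvArista.contains "switching") = true))]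
      rw [if_pos (by decide : (("arista_eos_system_info" == "arista_eos_system_info") && pvArista.contains "system_info") = true)]
    have e2 : pvStepB pvArista d "arista_eos_system_info" = d.insert "system_info" ((pvArista.get? "system_info").getD []) := by
      simp only [pvStepB, (by decide : PySem.Str.slice "arista_eos_system_info" (some 11) none = "system_info")]
      rw [if_pos (by decide : (PySem.Str.startswith "arista_eos_system_info" "arista_eos_") = true),
        if_pos (by decide : (pvArista.contains "system_info") = true)]
    rw [e1, e2]
  have ha : pvStepA pvArista d cmd = d := by
    simp [pvStepA, h1, h2, h3, h4, h5, h6]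
  rw [ha]
  simp only [pvStepB]
  split_ifs with hsw hct
  · exfalso
    have hmem : "interfaces" = PySem.Str.slice cmd (some 11) none ∨ "mlag" = PySem.Str.slice cmd (some 11) none ∨ "protocols" = PySem.Str.slice cmd (some 11) none ∨ "routing" = PySem.Str.slice cmd (some 11) none ∨ "switching" = PySem.Str.slice cmd (some 11) none ∨ "system_info" = PySem.Str.slice cmd (some 11) none := by
      revert hct; simp [pvArista, beq_iff_eq]
    have hlist := pv_cmd_eq cmd (PySem.Str.slice cmd (some 11) none) hsw rfl
    rcases hmem with h | h | h | h | h | h <;> rw [← h] at hlist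
    · exact h1 (String.toList_inj.mp (by rw [hlist]; decide))
    · exact h2 (String.toList_inj.mp (by rw [hlist]; decide))
    · exact h3 (String.toList_inj.mp (by rw [hlist]; decide))
    · exact h4 (String.toList_inj.mp (by rw [hlist]; decide))
    · exact h5 (String.toList_inj.mp (by rw [hlist]; decide))
    · exact h6 (String.toList_inj.mp (by rw [hlist]; decide))
  · rfl
  · rfl

-- the two loop bodies agree on the cisco command set
lemma pv_step_cisco (d : PySem.Dict String (List (String × String))) (cmd : String) :
    pvStepA pvCisco d cmd = pvStepB pvCisco d cmd := by
  by_cases h1 : cmd = "arista_eos_interfaces"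
  · subst h1
    have e1 : pvStepA pvCisco d "arista_eos_interfaces" = d.insert "interfaces" ((pvCisco.get? "interfaces").getD []) := by
      unfold pvStepA
      rw [if_pos (by decide : (("arista_eos_interfaces" == "arista_eos_interfaces") && pvCisco.contains "interfaces") = true)]
    have e2 : pvStepB pvCisco d "arista_eos_interfaces" = d.insert "interfaces" ((pvCisco.get? "interfaces").getD []) := by
      simp only [pvStepB, (by decide : PySem.Str.slice "arista_eos_interfaces" (some 11) none = "interfaces")]
      rw [if_pos (by decide : (PySem.Str.startswith "arista_eos_interfaces" "arista_eos_") = true),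
        if_pos (by decide : (pvCisco.contains "interfaces") = true)]
    rw [e1, e2]
  by_cases h6 : cmd = "arista_eos_system_info"
  · subst h6
    have e1 : pvStepA pvCisco d "arista_eos_system_info" = d.insert "system_info" ((pvCisco.get? "system_info").getD []) := by
      unfold pvStepA
      rw [if_neg (by decide : ¬ ((("arista_eos_system_info" == "arista_eos_interfaces") && pvCisco.contains "interfaces") = true))]
      rw [if_neg (by decide : ¬ ((("arista_eos_system_info" == "arista_eos_mlag") && pvCisco.contains "mlag") = true))]
      rw [if_neg (by decide : ¬ ((("arista_eos_system_info" == "arista_eos_protocols") && pvCisco.contains "protocols") = true))]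
      rw [if_neg (by decide : ¬ ((("arista_eos_system_info" == "arista_eos_routing") && pvCisco.contains "routing") = true))]
      rw [if_neg (by decide : ¬ ((("arista_eos_system_info" == "arista_eos_switching") && pvCisco.contains "switching") = true))]
      rw [if_pos (by decide : (("arista_eos_system_info" == "arista_eos_system_info") && pvCisco.contains "system_info") = true)]
    have e2 : pvStepB pvCisco d "arista_eos_system_info" = d.insert "system_info" ((pvCisco.get? "system_info").getD []) := by
      simp only [pvStepB, (by decide : PySem.Str.slice "arista_eos_system_info" (some 11) none = "system_info")]
      rw [if_pos (by decide : (PySem.Str.startswith "arista_eos_system_info" "arista_eos_") = true),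
        if_pos (by decide : (pvCisco.contains "system_info") = true)]
    rw [e1, e2]
  have ha : pvStepA pvCisco d cmd = d := by
    by_cases h2 : cmd = "arista_eos_mlag"
    · subst h2; simp [pvStepA, (by decide : pvCisco.contains "mlag" = false)]
    by_cases h3 : cmd = "arista_eos_protocols"
    · subst h3; simp [pvStepA, (by decide : pvCisco.contains "protocols" = false)]
    by_cases h4 : cmd = "arista_eos_routing"
    · subst h4; simp [pvStepA, (by decide : pvCisco.contains "routing" = false)]
    by_cases h5 : cmd = "arista_eos_switching"
    · subst h5; simp [pvStepA, (by decide : pvCisco.contains "switching" = false)]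
    simp [pvStepA, h1, h2, h3, h4, h5, h6]
  rw [ha]
  simp only [pvStepB]
  split_ifs with hsw hct
  · exfalso
    have hmem : "interfaces" = PySem.Str.slice cmd (some 11) none ∨ "system_info" = PySem.Str.slice cmd (some 11) none := by
      revert hct; simp [pvCisco, beq_iff_eq]
    have hlist := pv_cmd_eq cmd (PySem.Str.slice cmd (some 11) none) hsw rfl
    rcases hmem with h | h <;> rw [← h] at hlist
    · exact h1 (String.toList_inj.mp (by rw [hlist]; decide))
    · exact h6 (String.toList_inj.mp (by rw [hlist]; decide))
  · rfl
  · rfl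

-- the whole loops agree on either command set
lemma pv_fold_eq (all : PySem.Dict String (List (String × String)))
    (hall : all = pvArista ∨ all = pvCisco) (cmds : List String) :
    cmds.foldl (pvStepA all) PySem.Dict.empty = cmds.foldl (pvStepB all) PySem.Dict.empty := by
  have hfun : pvStepA all = pvStepB all := by
    funext d cmd
    rcases hall with h | h <;> subst h
    · exact pv_step_arista d cmd
    · exact pv_step_cisco d cmd
  rw [hfun]

-- A's three-way device_type selection equals B's two-way one
lemma pv_all_eq (device_type : String) :
    (if device_type == "arista_eos" then pvArista
     else if device_type == "cisco_ios" || device_type == "cisco_nexus" ||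
              device_type == "cisco_iosxr" then pvCisco
     else pvArista) =
    (if device_type == "cisco_ios" || device_type == "cisco_nexus" ||
         device_type == "cisco_iosxr" then pvCisco else pvArista) := by
  by_cases h : device_type = "arista_eos"
  · subst h; decide
  · simp [h]

-- ===== VERDICT (by name: the statement is the Claim_ definition above) =====
theorem get_command_groups_py_spec : Claim_equal_get_command_groups_py := by
  intro device_type selected_commands _
  unfold Spec_get_command_groups_py
  simp only [get_command_groups_py, get_command_groups_py_alt, pv_all_eq]
  have hall : (if device_type == "cisco_ios" || device_type == "cisco_nexus" ||
      device_type == "cisco_iosxr" then pvCisco else pvArista) = pvArista ∨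
      (if device_type == "cisco_ios" || device_type == "cisco_nexus" ||
      device_type == "cisco_iosxr" then pvCisco else pvArista) = pvCisco := by
    by_cases h : (device_type == "cisco_ios" || device_type == "cisco_nexus" ||
        device_type == "cisco_iosxr") = true
    · right; simp [h]
    · left; simp [h]
  set all := (if device_type == "cisco_ios" || device_type == "cisco_nexus" ||
      device_type == "cisco_iosxr" then pvCisco else pvArista) with hdef
  cases selected_commands with
  | none => rfl
  | some cmds =>
    simp only
    rw [pv_fold_eq all hall cmds]
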